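-- pv_equiv track=rewrite | github.com/wesheets/promethios | src/phase_6_3_1/continuous_monitoring/governance_inheritance_monitor.py | _has_inheritance_loop
-- ===== SOURCE A (Python) =====
-- from typing import Dict, List, Any, Optional, Set, Tuple
--
-- def _has_inheritance_loop(chain: List[str]) -> bool:
--     """
--     Check if an inheritance chain contains a loop.
--
--     Args:
--         chain: Inheritance chain to check
--
--     Returns:
--         True if the chain contains a loop, False otherwise
--     """
--     # Count occurrences of each entity in the chain
--     entity_counts = {}
--     for entity in chain:
--         if entity in entity_counts:
--             entity_counts[entity] += 1
--         else:
--             entity_counts[entity] = 1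
--
--     # If any entity appears more than once, we have a loop
--     for entity, count in entity_counts.items():
--         if count > 1:
--             return True
--
--     return False
-- ===== SOURCE B (Python) =====
-- def _has_inheritance_loop(chain):
--     s = sorted(chain)
--     for a, b in zip(s, s[1:]):
--         if a == b:
--             return True
--     return False
-- ===== Notes on version B (the rewrite author's own statement) =====
-- stated objective: alternative
-- what changed: Replaces A's counting-dict build plus duplicate-scanning pass with sort-then-adjacent-scan: sort the chain and report a loop iff two adjacent sorted elements are equal.
import Mathlib
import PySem

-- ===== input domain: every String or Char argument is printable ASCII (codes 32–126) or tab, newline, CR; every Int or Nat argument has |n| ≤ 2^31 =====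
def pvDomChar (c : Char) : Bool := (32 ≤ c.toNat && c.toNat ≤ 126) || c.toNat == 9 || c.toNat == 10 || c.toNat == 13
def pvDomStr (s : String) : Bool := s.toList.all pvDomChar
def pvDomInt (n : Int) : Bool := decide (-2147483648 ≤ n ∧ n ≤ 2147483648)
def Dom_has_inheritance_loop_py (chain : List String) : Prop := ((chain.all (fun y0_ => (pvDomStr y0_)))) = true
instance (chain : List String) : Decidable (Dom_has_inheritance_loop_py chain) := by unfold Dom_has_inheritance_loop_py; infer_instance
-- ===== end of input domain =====

-- B replaces A's counting dict and duplicate-scanning pass with sort-then-adjacent-scan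
-- (alternative algorithm: duplicates are adjacent in the sorted chain; same return value).


-- ===== PORT A =====
-- entity_counts = {}; for entity in chain: if entity in entity_counts: +=1 else: =1
def has_inheritance_loop_py (chain : List String) : Bool :=
  let entity_counts : PySem.Dict String Int :=
    chain.foldl
      (fun d entity =>
        if d.contains entity then
          d.insert entity (d.getD entity 0 + 1)   -- entity_counts[entity] += 1
        else
          d.insert entity 1)                      -- entity_counts[entity] = 1
      PySem.Dict.empty
  -- for entity, count in entity_counts.items(): if count > 1: return True; return False
  entity_counts.items.any (fun p => p.2 > 1)

-- ===== PORT B =====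
-- s = sorted(chain); for a, b in zip(s, s[1:]): if a == b: return True; return False
def has_inheritance_loop_py_alt (chain : List String) : Bool :=
  let s := PySem.List.sorted chain (fun x => x) false
  (s.zip (PySem.List.slice s (some 1) none)).any (fun p => p.1 == p.2)

-- ===== PRECONDITION & SPEC =====
def Spec_has_inheritance_loop_py (chain : List String) (out : Bool) : Prop := out = has_inheritance_loop_py_alt chain
instance (chain : List String) (out : Bool) : Decidable (Spec_has_inheritance_loop_py chain out) := by unfold Spec_has_inheritance_loop_py; infer_instance

-- ===== CLAIM =====
def Claim_equal_has_inheritance_loop_py : Prop := ∀ (chain : List String), Dom_has_inheritance_loop_py chain → Spec_has_inheritance_loop_py chain (has_inheritance_loop_py chain)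

-- ===== LEMMAS AND PROOFS =====

-- A's branching dict update is exactly the Counter step.
theorem pv_step_eq_counter_step (d : PySem.Dict String Int) (e : String) :
    (if d.contains e then d.insert e (d.getD e 0 + 1) else d.insert e 1)
      = d.modify e 0 (· + 1) := by
  by_cases h : d.contains e = true
  · simp [PySem.Dict.modify, h]
  · simp at h
    rw [if_neg (by simp [h]), PySem.Dict.modify, PySem.Dict.getD_of_not_contains d 0 h]
    norm_num

theorem pv_dict_eq_counter (chain : List String) :
    chain.foldl
      (fun d entity =>
        if d.contains entity then d.insert entity (d.getD entity 0 + 1)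
        else d.insert entity 1)
      PySem.Dict.empty = PySem.Dict.counter chain := by
  rw [PySem.Dict.counter_eq_foldl]
  congr 1
  funext d e
  exact pv_step_eq_counter_step d e

theorem pv_a_eq_dup (chain : List String) :
    has_inheritance_loop_py chain = decide (∃ k ∈ chain, 1 < chain.count k) := by
  unfold has_inheritance_loop_py
  rw [pv_dict_eq_counter]
  show ((PySem.Dict.counter chain).items.any fun p => decide (p.2 > 1))
      = decide (∃ k ∈ chain, 1 < chain.count k)
  rw [PySem.Dict.items_counter, List.any_map]
  by_cases h : ∃ k ∈ chain, 1 < chain.count k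
  · obtain ⟨k, hk, hc⟩ := h
    rw [decide_eq_true (by exact ⟨k, hk, hc⟩)]
    simp only [List.any_eq_true]
    exact ⟨k, (PySem.Set.mem_ofList _ _).mpr hk, by simpa using hc⟩
  · rw [decide_eq_false h]
    simp only [List.any_eq_false]
    intro k hk
    have : ¬ 1 < chain.count k := fun hc => h ⟨k, (PySem.Set.mem_ofList _ _).mp hk, hc⟩
    simpa using not_lt.mp this

theorem pv_a_eq_not_nodup (chain : List String) :
    has_inheritance_loop_py chain = decide (¬ chain.Nodup) := by
  rw [pv_a_eq_dup]
  congr 1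
  simp only [eq_iff_iff, List.nodup_iff_count_le_one]
  push Not
  constructor
  · rintro ⟨k, _, hk⟩; exact ⟨k, hk⟩
  · rintro ⟨k, hk⟩
    exact ⟨k, List.count_pos_iff.mp (by omega), hk⟩

-- In a ≤-sorted list, some adjacent pair is equal iff the list has a duplicate.
theorem pv_adjacent_scan (s : List String) (hs : s.Pairwise (· ≤ ·)) :
    ((s.zip s.tail).any (fun p => p.1 == p.2)) = decide (¬ s.Nodup) := by
  induction s with
  | nil => simp
  | cons a t ih =>
    match t with
    | [] => simp
    | b :: t' =>
      have hpt : (b :: t').Pairwise (· ≤ ·) := hs.of_cons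
      have hab : a ≤ b := (List.pairwise_cons.mp hs).1 b (by simp)
      have hrest := ih hpt
      simp only [List.tail_cons, List.zip_cons_cons, List.any_cons] at hrest ⊢
      by_cases hEq : a = b
      · subst hEq
        have : ¬ (a :: a :: t').Nodup := by simp
        simp [this]
      · have hanin : a ∉ b :: t' := by
          intro hmem
          rcases List.mem_cons.mp hmem with h | h
          · exact hEq h
          · have hba : b ≤ a := (List.pairwise_cons.mp hpt).1 a h
            exact hEq (le_antisymm hab hba)
        have hnd : (a :: b :: t').Nodup ↔ (b :: t').Nodup := by
          simp [List.nodup_cons, hanin]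
        rw [beq_eq_false_iff_ne.mpr hEq, Bool.false_or, hrest]
        simp [hnd]

theorem pv_equal (chain : List String) :
    has_inheritance_loop_py chain = has_inheritance_loop_py_alt chain := by
  rw [pv_a_eq_not_nodup]
  show _ = ((PySem.List.sorted chain (fun x => x) false).zip
      (PySem.List.slice (PySem.List.sorted chain (fun x => x) false) (some 1) none)).any
      (fun p => p.1 == p.2)
  have hperm := PySem.List.sorted_perm chain (fun x => x) false
  have hpw : (PySem.List.sorted chain (fun x => x) false).Pairwise (· ≤ ·) :=
    PySem.List.sorted_pairwise chain (fun x => x)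
  rw [PySem.List.slice_from_one]
  rw [pv_adjacent_scan _ hpw]
  congr 1
  simp [hperm.nodup_iff]

-- ===== VERDICT =====
theorem has_inheritance_loop_py_spec : Claim_equal_has_inheritance_loop_py := by
  intro chain _
  exact pv_equal chain
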